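-- pv_equiv track=rewrite | github.com/fitz-s/zeus | scripts/check_live_order_e2e.py | _order_identity_consistent
-- ===== SOURCE A (Python) =====
-- def _order_identity_consistent(evidence: dict[str, list[str]]) -> bool:
--     values = {
--         value
--         for source_values in evidence.values()
--         for value in source_values
--         if value
--     }
--     return bool(values) and len(values) == 1
-- ===== SOURCE B (Python) =====
-- def _order_identity_consistent(evidence: dict[str, list[str]]) -> bool:
--     ref = None
--     found = False
--     for source_values in evidence.values():
--         for value in source_values:
--             if not value:
--                 continue
--             if not found:
--                 ref = value
--                 found = True
--             elif value != ref:
--                 return False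
--     return found
-- ===== Notes on version B (the rewrite author's own statement) =====
-- stated objective: simpler
-- what changed: Replaces building a set of all distinct non-empty values and testing its size with a single compare-as-you-go scan keeping one reference value and a found flag, returning False at the first mismatch.
import Mathlib
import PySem

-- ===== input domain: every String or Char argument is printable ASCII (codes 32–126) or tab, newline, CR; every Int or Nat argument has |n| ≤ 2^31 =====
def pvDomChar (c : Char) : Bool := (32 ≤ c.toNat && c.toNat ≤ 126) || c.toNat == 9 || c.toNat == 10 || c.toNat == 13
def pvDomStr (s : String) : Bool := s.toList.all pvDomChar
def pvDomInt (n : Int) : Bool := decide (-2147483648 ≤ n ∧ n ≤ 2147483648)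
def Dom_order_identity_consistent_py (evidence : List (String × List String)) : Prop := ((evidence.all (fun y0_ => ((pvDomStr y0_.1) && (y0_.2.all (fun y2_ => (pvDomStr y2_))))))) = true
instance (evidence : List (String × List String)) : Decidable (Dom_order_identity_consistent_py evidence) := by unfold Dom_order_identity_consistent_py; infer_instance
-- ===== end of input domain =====

-- ===== PORT A =====
-- B replaces the distinct-value set with a single kept reference and early exit; simpler, O(1) extra space.
-- set comprehension over evidence.values(): fold Set.add over each non-empty value, in iteration order
def order_identity_consistent_py (evidence : List (String × List String)) : Bool :=
  let values : PySem.Set String :=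
    evidence.foldl
      (fun s p => p.2.foldl (fun s v => if v = "" then s else PySem.Set.add s v) s)
      PySem.Set.empty
  -- bool(values) and len(values) == 1
  decide (PySem.Set.len values ≠ 0) && decide (PySem.Set.len values = 1)

-- ===== PORT B =====
-- inner loop: state is the reference (none = nothing recorded yet); result none = early `return False`
def oicAltInner (r : Option String) : List String → Option (Option String)
  | [] => some r
  | v :: vs =>
    if v = "" then oicAltInner r vs
    else
      match r with
      | none => oicAltInner (some v) vs
      | some x => if v = x then oicAltInner (some x) vs else none

-- outer loop over the sources
def oicAltOuter (r : Option String) : List (String × List String) → Option (Option String)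
  | [] => some r
  | p :: es =>
    match oicAltInner r p.2 with
    | none => none
    | some r' => oicAltOuter r' es

def order_identity_consistent_py_alt (evidence : List (String × List String)) : Bool :=
  match oicAltOuter none evidence with
  | none => false          -- early return False
  | some r => r.isSome     -- return found

-- ===== PRECONDITION & SPEC =====
def Spec_order_identity_consistent_py (evidence : List (String × List String)) (out : Bool) : Prop := out = order_identity_consistent_py_alt evidence
instance (evidence : List (String × List String)) (out : Bool) : Decidable (Spec_order_identity_consistent_py evidence out) := by unfold Spec_order_identity_consistent_py; infer_instance

-- ===== CLAIM (what is proved, stated in full; the proofs are below) =====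
def Claim_equal_order_identity_consistent_py : Prop := ∀ (evidence : List (String × List String)), Dom_order_identity_consistent_py evidence → Spec_order_identity_consistent_py evidence (order_identity_consistent_py evidence)

-- ===== LEMMAS AND PROOFS =====

-- the conditional set insertion A's comprehension performs on one value
def oicAdd (s : PySem.Set String) (v : String) : PySem.Set String :=
  if v = "" then s else PySem.Set.add s v

theorem oicAdd_len_le (s : PySem.Set String) (v : String) :
    s.length ≤ (oicAdd s v).length := by
  simp only [oicAdd, PySem.Set.add]
  split
  · exact le_refl _
  · split
    · exact le_refl _
    · simp

theorem oic_len_mono_inner (l : List String) (s : PySem.Set String) :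
    s.length ≤ (l.foldl oicAdd s).length := by
  induction l generalizing s with
  | nil => simp
  | cons v vs ih => exact le_trans (oicAdd_len_le s v) (ih _)

theorem oic_len_mono_outer (es : List (String × List String)) (s : PySem.Set String) :
    s.length ≤ (es.foldl (fun s p => p.2.foldl oicAdd s) s).length := by
  induction es generalizing s with
  | nil => simp
  | cons q es ih => exact le_trans (oic_len_mono_inner q.2 s) (ih _)

-- correspondence between B's reference state and A's set-so-far
def oicCorr (r : Option String) (s : PySem.Set String) : Prop :=
  (r = none ∧ s = []) ∨ (∃ x, r = some x ∧ s = [x])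

theorem oic_inner_inv (l : List String) (r : Option String) (s : PySem.Set String)
    (h : oicCorr r s) :
    (oicAltInner r l = none → 2 ≤ (l.foldl oicAdd s).length) ∧
    (∀ r', oicAltInner r l = some r' → oicCorr r' (l.foldl oicAdd s)) := by
  induction l generalizing r s with
  | nil =>
    refine ⟨by simp [oicAltInner], ?_⟩
    intro r' hr'
    simp [oicAltInner] at hr'
    simpa [hr'] using h
  | cons v vs ih =>
    by_cases hv : v = ""
    · simpa [oicAltInner, hv, oicAdd] using ih r s h
    · rcases h with ⟨hr, hs⟩ | ⟨x, hr, hs⟩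
      · subst hr; subst hs
        have hcorr : oicCorr (some v) (oicAdd [] v) := by
          right; exact ⟨v, rfl, by simp [oicAdd, hv, PySem.Set.add, PySem.Set.contains]⟩
        simpa [oicAltInner, hv] using ih (some v) (oicAdd [] v) hcorr
      · subst hr; subst hs
        by_cases hvx : v = x
        · subst hvx
          have hadd : oicAdd [v] v = [v] := by
            simp [oicAdd, hv, PySem.Set.add, PySem.Set.contains]
          have := ih (some v) (oicAdd [v] v) (by rw [hadd]; exact Or.inr ⟨v, rfl, rfl⟩)
          simpa [oicAltInner, hv] using this
        · have hadd : oicAdd [x] v = [x, v] := by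
            simp [oicAdd, hv, PySem.Set.add, PySem.Set.contains, hvx]
          constructor
          · intro _
            simp only [List.foldl, hadd]
            exact le_trans (by simp) (oic_len_mono_inner vs [x, v])
          · intro r' hr'
            simp [oicAltInner, hv, hvx] at hr'

theorem oic_outer_inv (es : List (String × List String)) (r : Option String)
    (s : PySem.Set String) (h : oicCorr r s) :
    (oicAltOuter r es = none →
      2 ≤ (es.foldl (fun s p => p.2.foldl oicAdd s) s).length) ∧
    (∀ r', oicAltOuter r es = some r' →
      oicCorr r' (es.foldl (fun s p => p.2.foldl oicAdd s) s)) := by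
  induction es generalizing r s with
  | nil =>
    refine ⟨by simp [oicAltOuter], ?_⟩
    intro r' hr'
    simp [oicAltOuter] at hr'
    simpa [hr'] using h
  | cons p es ih =>
    obtain ⟨h1, h2⟩ := oic_inner_inv p.2 r s h
    constructor
    · intro hn
      simp only [oicAltOuter] at hn
      cases hi : oicAltInner r p.2 with
      | none =>
        simp only [List.foldl]
        calc 2 ≤ (p.2.foldl oicAdd s).length := h1 hi
          _ ≤ _ := oic_len_mono_outer es _
      | some r1 =>
        rw [hi] at hn
        exact (ih r1 _ (h2 r1 hi)).1 hn
    · intro r' hr'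
      simp only [oicAltOuter] at hr'
      cases hi : oicAltInner r p.2 with
      | none => rw [hi] at hr'; simp at hr'
      | some r1 =>
        rw [hi] at hr'
        exact (ih r1 _ (h2 r1 hi)).2 r' hr'

-- ===== VERDICT (by name: the statement is the Claim_ definition above) =====
theorem order_identity_consistent_py_spec : Claim_equal_order_identity_consistent_py := by
  intro evidence _
  unfold Spec_order_identity_consistent_py order_identity_consistent_py order_identity_consistent_py_alt
  show (decide (PySem.Set.len (List.foldl (fun s p => List.foldl oicAdd s p.2) ([] : PySem.Set String) evidence) ≠ 0) &&
      decide (PySem.Set.len (List.foldl (fun s p => List.foldl oicAdd s p.2) ([] : PySem.Set String) evidence) = 1)) =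
    (match oicAltOuter none evidence with | none => false | some r => r.isSome)
  obtain ⟨h1, h2⟩ := oic_outer_inv evidence none ([] : PySem.Set String) (Or.inl ⟨rfl, rfl⟩)
  cases ho : oicAltOuter none evidence with
  | none =>
    have hge := h1 ho
    simp only [PySem.Set.len]
    simp
    intro _
    omega
  | some r =>
    rcases h2 r ho with ⟨hr, hs⟩ | ⟨x, hr, hs⟩
    · rw [hr, hs]
      simp [PySem.Set.len]
    · rw [hr, hs]
      simp [PySem.Set.len]
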